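-- pv_equiv track=rewrite | github.com/Skyross/resume-builder | src/parse_linkedin.py | find_section_indices
-- ===== SOURCE A (Python) =====
-- def find_section_indices(lines: list[str]) -> dict[str, int]:
--     """Find the line indices of major section headers."""
--     sections = {}
--     section_markers = ["Contact", "Top Skills", "Languages", "Certifications", "Summary", "Experience", "Education"]
--
--     for i, line in enumerate(lines):
--         stripped = line.strip()
--         if stripped in section_markers and stripped not in sections:
--             sections[stripped] = i
--
--     return sections
-- ===== SOURCE B (Python) =====
-- def find_section_indices(lines: list[str]) -> dict[str, int]:
--     """Find the line indices of major section headers."""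
--     section_markers = ["Contact", "Top Skills", "Languages", "Certifications", "Summary", "Experience", "Education"]
--     pairs = []
--     for marker in section_markers:
--         idx = next((i for i, line in enumerate(lines) if line.strip() == marker), None)
--         if idx is not None:
--             pairs.append((marker, idx))
--     pairs.sort(key=lambda p: p[1])
--     return dict(pairs)
-- ===== Notes on version B (the rewrite author's own statement) =====
-- stated objective: alternative
-- what changed: B flips the traversal: instead of one pass over lines filtering against the marker list, it scans once per marker for its first matching line and then sorts the found pairs by line index to restore first-appearance order.
import Mathlib
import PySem

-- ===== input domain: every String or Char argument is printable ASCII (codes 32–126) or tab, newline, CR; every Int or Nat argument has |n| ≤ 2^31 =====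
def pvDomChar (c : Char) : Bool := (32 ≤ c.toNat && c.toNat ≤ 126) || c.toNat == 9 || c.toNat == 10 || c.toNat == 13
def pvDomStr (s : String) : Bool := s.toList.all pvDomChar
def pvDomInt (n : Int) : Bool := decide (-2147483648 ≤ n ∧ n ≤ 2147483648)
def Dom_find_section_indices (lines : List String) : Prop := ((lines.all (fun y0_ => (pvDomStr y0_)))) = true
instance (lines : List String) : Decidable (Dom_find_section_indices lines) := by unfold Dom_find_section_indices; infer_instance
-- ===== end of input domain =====

set_option maxHeartbeats 1000000


-- B flips the traversal: one scan per marker for its first matching line, then a sort by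
-- line index restores first-appearance order (alternative, not faster).

-- ===== PORT A =====
def pvMarkers : List String :=
  ["Contact", "Top Skills", "Languages", "Certifications", "Summary", "Experience", "Education"]

def find_section_indices (lines : List String) : List (String × Int) :=
  ((PySem.List.enumerate lines).foldl
    (fun (d : PySem.Dict String Int) p =>
      let stripped := PySem.Str.strip p.2
      if stripped ∈ pvMarkers ∧ d.contains stripped = false then d.insert stripped p.1 else d)
    PySem.Dict.empty).items

-- ===== PORT B =====
-- first index i (counting from `i`) with lines[·].strip() == marker  (the Python `next(... enumerate ...)`)
def pvFirstIndex? (lines : List String) (i : Int) (marker : String) : Option Int :=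
  match lines with
  | [] => none
  | l :: ls => if PySem.Str.strip l = marker then some i else pvFirstIndex? ls (i + 1) marker

def find_section_indices_alt (lines : List String) : List (String × Int) :=
  let pairs := pvMarkers.filterMap (fun m => (pvFirstIndex? lines 0 m).map (fun i => (m, i)))
  PySem.List.sorted pairs (fun p => p.2) false

-- ===== PRECONDITION & SPEC =====
def Spec_find_section_indices (lines : List String) (out : List (String × Int)) : Prop := out = find_section_indices_alt lines
instance (lines : List String) (out : List (String × Int)) : Decidable (Spec_find_section_indices lines out) := by unfold Spec_find_section_indices; infer_instance

-- ===== CLAIM (what is proved, stated in full; the proofs are below) =====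
def Claim_equal_find_section_indices : Prop := ∀ (lines : List String), Dom_find_section_indices lines → Spec_find_section_indices lines (find_section_indices lines)

-- ===== LEMMAS AND PROOFS =====

-- ghost: the pairs A appends, scanning lines from index i with `seen` already-recorded keys
def pvGhost (lines : List String) (i : Int) (seen : List String) : List (String × Int) :=
  match lines with
  | [] => []
  | l :: ls =>
    let s := PySem.Str.strip l
    if s ∈ pvMarkers ∧ s ∉ seen then (s, i) :: pvGhost ls (i + 1) (s :: seen)
    else pvGhost ls (i + 1) seen

lemma pvGhost_seen_congr (lines : List String) (i : Int) (s1 s2 : List String)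
    (h : ∀ x, x ∈ s1 ↔ x ∈ s2) : pvGhost lines i s1 = pvGhost lines i s2 := by
  induction lines generalizing i s1 s2 with
  | nil => rfl
  | cons l ls ih =>
    simp only [pvGhost]
    by_cases hm : PySem.Str.strip l ∈ pvMarkers ∧ PySem.Str.strip l ∉ s1
    · rw [if_pos hm, if_pos ⟨hm.1, fun hx => hm.2 ((h _).mpr hx)⟩]
      rw [ih (i + 1) (PySem.Str.strip l :: s1) (PySem.Str.strip l :: s2)
        (fun x => by simp only [List.mem_cons]; exact or_congr Iff.rfl (h x))]
    · rw [if_neg hm, if_neg (fun hc => hm ⟨hc.1, fun hx => hc.2 ((h _).mp hx)⟩)]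
      exact ih _ _ _ h

lemma pvFoldA (lines : List String) (i : Int) (d : PySem.Dict String Int)
    (hnd : d.keys.Nodup) :
    ((PySem.List.enumerate lines i).foldl
      (fun (d : PySem.Dict String Int) p =>
        let stripped := PySem.Str.strip p.2
        if stripped ∈ pvMarkers ∧ d.contains stripped = false then d.insert stripped p.1 else d)
      d).items = d.items ++ pvGhost lines i d.keys := by
  induction lines generalizing i d with
  | nil => simp [PySem.List.enumerate_nil, pvGhost]
  | cons l ls ih =>
    rw [PySem.List.enumerate_cons]
    simp only [List.foldl_cons, pvGhost]
    by_cases hc : PySem.Str.strip l ∈ pvMarkers ∧ d.contains (PySem.Str.strip l) = false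
    · have hnotmem : PySem.Str.strip l ∉ d.keys := by
        have h2 := hc.2
        rw [PySem.Dict.contains_eq_decide_mem_keys] at h2
        simpa using h2
      rw [if_pos hc, if_pos ⟨hc.1, hnotmem⟩]
      have hkeys : (d.insert (PySem.Str.strip l) i).keys = d.keys ++ [PySem.Str.strip l] := by
        simp [PySem.Dict.keys, PySem.Dict.items_insert_of_not_contains d i hc.2]
      have hnd' : (d.insert (PySem.Str.strip l) i).keys.Nodup := by
        rw [hkeys]
        refine List.Nodup.append hnd (List.nodup_singleton _) ?_
        intro a ha hb
        rw [List.mem_singleton] at hb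
        exact hnotmem (hb ▸ ha)
      rw [ih (i + 1) _ hnd', PySem.Dict.items_insert_of_not_contains d i hc.2, hkeys]
      rw [pvGhost_seen_congr ls (i + 1) (d.keys ++ [PySem.Str.strip l]) (PySem.Str.strip l :: d.keys)
        (by intro x; simp [List.mem_append, List.mem_cons]; exact Or.comm)]
      simp
    · rw [if_neg hc, ih (i + 1) d hnd]
      congr 1
      rw [if_neg (by
        intro h
        exact hc ⟨h.1, by rw [PySem.Dict.contains_eq_decide_mem_keys]; simpa using h.2⟩)]

lemma pvMem_ghost (lines : List String) (i : Int) (seen : List String) (a : String) (j : Int) :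
    (a, j) ∈ pvGhost lines i seen ↔
      a ∈ pvMarkers ∧ a ∉ seen ∧ pvFirstIndex? lines i a = some j := by
  induction lines generalizing i seen with
  | nil => simp [pvGhost, pvFirstIndex?]
  | cons l ls ih =>
    simp only [pvGhost, pvFirstIndex?]
    by_cases hsa : PySem.Str.strip l = a
    · rw [hsa, if_pos rfl]
      by_cases hc : a ∈ pvMarkers ∧ a ∉ seen
      · rw [if_pos hc]
        constructor
        · intro h
          rcases List.mem_cons.mp h with h | h
          · rw [Prod.mk.injEq] at h
            exact ⟨hc.1, hc.2, by rw [h.2]⟩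
          · exact absurd (by simp : a ∈ a :: seen) ((ih _ _).mp h).2.1
        · rintro ⟨_, _, h⟩
          rw [Option.some.injEq] at h
          exact List.mem_cons.mpr (Or.inl (by rw [h]))
      · rw [if_neg hc, ih]
        constructor <;> (rintro ⟨h1, h2, _⟩; exact absurd ⟨h1, h2⟩ hc)
    · rw [if_neg hsa]
      by_cases hc : PySem.Str.strip l ∈ pvMarkers ∧ PySem.Str.strip l ∉ seen
      · rw [if_pos hc]
        constructor
        · intro h
          rcases List.mem_cons.mp h with h | h
          · rw [Prod.mk.injEq] at h
            exact absurd h.1.symm hsa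
          · obtain ⟨h1, h2, h3⟩ := (ih _ _).mp h
            exact ⟨h1, fun hm => h2 (List.mem_cons.mpr (Or.inr hm)), h3⟩
        · rintro ⟨h1, h2, h3⟩
          refine List.mem_cons.mpr (Or.inr ((ih _ _).mpr ⟨h1, ?_, h3⟩))
          intro hm
          rcases List.mem_cons.mp hm with h | h
          · exact hsa h.symm
          · exact h2 h
      · rw [if_neg hc]
        exact ih _ _

lemma pvGhost_ge (lines : List String) (i : Int) (seen : List String) :
    ∀ p ∈ pvGhost lines i seen, i ≤ p.2 := by
  induction lines generalizing i seen with
  | nil => simp [pvGhost]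
  | cons l ls ih =>
    intro p hp
    simp only [pvGhost] at hp
    split at hp
    · rcases List.mem_cons.mp hp with h | h
      · rw [h]
      · have := ih (i + 1) _ p h; omega
    · have := ih (i + 1) _ p hp; omega

lemma pvGhost_pairwise (lines : List String) (i : Int) (seen : List String) :
    (pvGhost lines i seen).Pairwise (fun a b => a.2 < b.2) := by
  induction lines generalizing i seen with
  | nil => simp [pvGhost]
  | cons l ls ih =>
    simp only [pvGhost]
    split
    · refine List.Pairwise.cons ?_ (ih _ _)
      intro b hb
      have := pvGhost_ge ls (i + 1) _ b hb
      show i < b.2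
      omega
    · exact ih _ _

lemma pvMem_pairs (lines : List String) (a : String) (j : Int) :
    (a, j) ∈ pvMarkers.filterMap (fun m => (pvFirstIndex? lines 0 m).map (fun i => (m, i))) ↔
      a ∈ pvMarkers ∧ pvFirstIndex? lines 0 a = some j := by
  rw [List.mem_filterMap]
  constructor
  · rintro ⟨m, hm, hf⟩
    rcases Option.map_eq_some_iff.mp hf with ⟨i, hi, hpi⟩
    rw [Prod.mk.injEq] at hpi
    rw [← hpi.1, ← hpi.2]
    exact ⟨hm, hi⟩
  · rintro ⟨h1, h2⟩
    exact ⟨a, h1, by rw [h2]; rfl⟩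

lemma pvPairs_nodup (lines : List String) :
    (pvMarkers.filterMap (fun m => (pvFirstIndex? lines 0 m).map (fun i => (m, i)))).Nodup := by
  have h : (pvMarkers.filterMap (fun m => (pvFirstIndex? lines 0 m).map (fun i => (m, i)))).Pairwise
      (fun a b => a.1 ≠ b.1) := by
    refine List.Pairwise.filterMap _ ?_ (show pvMarkers.Pairwise (· ≠ ·) by decide)
    intro m m' hne b hb b' hb'
    rcases Option.map_eq_some_iff.mp hb with ⟨_, _, hb2⟩
    rcases Option.map_eq_some_iff.mp hb' with ⟨_, _, hb2'⟩
    rw [← hb2, ← hb2']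
    exact hne
  exact h.imp (fun hne he => hne (congrArg Prod.fst he))

lemma pvGhost_perm_pairs (lines : List String) :
    (pvGhost lines 0 []).Perm
      (pvMarkers.filterMap (fun m => (pvFirstIndex? lines 0 m).map (fun i => (m, i)))) := by
  rw [List.perm_ext_iff_of_nodup
    ((pvGhost_pairwise lines 0 []).imp (fun h he => by rw [he] at h; exact lt_irrefl _ h))
    (pvPairs_nodup lines)]
  rintro ⟨a, j⟩
  rw [pvMem_ghost, pvMem_pairs]
  simp

-- ===== VERDICT (by name: the statement is the Claim_ definition above) =====
theorem find_section_indices_spec : Claim_equal_find_section_indices := by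
  intro lines _
  show find_section_indices lines = find_section_indices_alt lines
  unfold find_section_indices find_section_indices_alt
  rw [pvFoldA lines 0 PySem.Dict.empty (by simp [PySem.Dict.keys, PySem.Dict.empty])]
  have hs := PySem.List.sorted_eq_of_perm_of_pairwise_lt
    (pvMarkers.filterMap (fun m => (pvFirstIndex? lines 0 m).map (fun i => (m, i))))
    (pvGhost lines 0 []) (fun p : String × Int => p.2)
    (pvGhost_perm_pairs lines) (pvGhost_pairwise lines 0 [])
  simpa [PySem.Dict.empty, PySem.Dict.items, PySem.Dict.keys] using hs.symm
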